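-- pv_equiv track=rewrite | github.com/michael-horansky/battle-of-causality | class_Activity_map_iterator.py | compare_states_by_recency
-- ===== SOURCE A (Python) =====
-- def compare_states_by_recency(A, B):
--     # The highest-index point of difference: higher False means larger (further down in descending priority)
--     for i in range(len(A) - 1, -1, -1):
--         if A[i] != B[i]:
--             if A[i] == False:
--                 return(1)
--             if B[i] == False:
--                 return(-1)
--     return(0)
-- ===== SOURCE B (Python) =====
-- def compare_states_by_recency(A, B):
--     # Encode each sequence as an integer: bit i is set iff the element at index i
--     # is falsy; then the sign of (va - vb) is the highest-index-difference verdict.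
--     va = 0
--     vb = 0
--     for i in range(len(A)):
--         va += (not A[i]) << i
--         vb += (not B[i]) << i
--     return (va > vb) - (va < vb)
-- ===== Notes on version B (the rewrite author's own statement) =====
-- stated objective: alternative
-- what changed: Replaces the descending early-return scan by encoding each sequence as an integer (bit i set iff element i is False) in one ascending pass and returning the sign of the comparison of the two integers.
import Mathlib
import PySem

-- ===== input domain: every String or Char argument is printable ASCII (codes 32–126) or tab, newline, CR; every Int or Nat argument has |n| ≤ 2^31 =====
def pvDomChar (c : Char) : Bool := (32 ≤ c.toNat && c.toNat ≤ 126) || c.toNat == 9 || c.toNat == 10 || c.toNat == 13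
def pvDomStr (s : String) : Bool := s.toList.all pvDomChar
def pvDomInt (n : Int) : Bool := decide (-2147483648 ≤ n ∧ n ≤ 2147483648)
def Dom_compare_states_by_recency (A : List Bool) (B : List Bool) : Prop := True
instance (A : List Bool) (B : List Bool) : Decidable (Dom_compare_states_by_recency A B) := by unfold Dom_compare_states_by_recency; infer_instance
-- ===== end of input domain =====

-- B replaces A's descending early-return scan by a one-pass bit-encoding of both
-- sequences (bit i set iff element i is False) and returns the sign of the integer
-- comparison (objective: alternative algorithm, same cost).

-- ===== PORT A =====
-- the descending loop with early returns; Python's fall-through structure kept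
def pvGoA (A B : List Bool) : List Int → Int
  | [] => 0
  | i :: rest =>
    let ai := PySem.List.pyGetD A i false
    let bi := PySem.List.pyGetD B i false
    if ai ≠ bi then
      if ai = false then 1
      else if bi = false then -1
      else pvGoA A B rest
    else pvGoA A B rest

def compare_states_by_recency (A : List Bool) (B : List Bool) : Int :=
  pvGoA A B (PySem.List.pyRange ((A.length : Int) - 1) (-1) (-1))

-- ===== PORT B =====
def compare_states_by_recency_alt (A : List Bool) (B : List Bool) : Int :=
  let p := (PySem.List.pyRange 0 (A.length : Int) 1).foldl
    (fun (s : Int × Int) i =>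
      (s.1 + (if PySem.List.pyGetD A i false then 0 else 2 ^ i.toNat),
       s.2 + (if PySem.List.pyGetD B i false then 0 else 2 ^ i.toNat))) (0, 0)
  (if p.1 > p.2 then 1 else 0) - (if p.1 < p.2 then 1 else 0)

-- ===== PRECONDITION & SPEC =====
-- Pre_ excludes exactly the inputs where Python A raises IndexError: a nonempty A
-- with B shorter than A (B[i] fails at i = len(A)-1).
def Pre_compare_states_by_recency (A : List Bool) (B : List Bool) : Prop :=
  A = [] ∨ A.length ≤ B.length
instance (A : List Bool) (B : List Bool) : Decidable (Pre_compare_states_by_recency A B) := by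
  unfold Pre_compare_states_by_recency; infer_instance

def pvWitness_compare_states_by_recency : List Bool × List Bool := ([true, false], [false, true])

def Spec_compare_states_by_recency (A : List Bool) (B : List Bool) (out : Int) : Prop := out = compare_states_by_recency_alt A B
instance (A : List Bool) (B : List Bool) (out : Int) : Decidable (Spec_compare_states_by_recency A B out) := by unfold Spec_compare_states_by_recency; infer_instance

-- ===== CLAIM (what is proved, stated in full; the proofs are below) =====
def Claim_equal_compare_states_by_recency : Prop := ∀ (A : List Bool) (B : List Bool), Dom_compare_states_by_recency A B → Pre_compare_states_by_recency A B → Spec_compare_states_by_recency A B (compare_states_by_recency A B)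

-- ===== LEMMAS AND PROOFS =====

-- the bit-encoding of the first n elements of X (False contributes 2^i)
def pvEnc (X : List Bool) (n : Nat) : Nat :=
  ∑ i ∈ Finset.range n, (if X.getD i false then 0 else 2 ^ i)

theorem pvEnc_succ (X : List Bool) (n : Nat) :
    pvEnc X (n + 1) = pvEnc X n + (if X.getD n false then 0 else 2 ^ n) := by
  simp [pvEnc, Finset.sum_range_succ]

theorem pvEnc_lt (X : List Bool) (n : Nat) : pvEnc X n < 2 ^ n := by
  induction n with
  | zero => simp [pvEnc]
  | succ n ih =>
    have h : (if X.getD n false then 0 else 2 ^ n) ≤ 2 ^ n := by split <;> omega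
    have h2 : 2 ^ (n + 1) = 2 ^ n + 2 ^ n := by ring
    rw [pvEnc_succ]; omega

-- the descending scan computes the sign of the encoding comparison
theorem pvGoA_eq (A B : List Bool) (n : Nat) (hA : n ≤ A.length) (hB : n ≤ B.length) :
    pvGoA A B (PySem.List.pyRange ((n : Int) - 1) (-1) (-1)) =
      (if pvEnc A n > pvEnc B n then 1 else 0) - (if pvEnc A n < pvEnc B n then (1 : Int) else 0) := by
  induction n with
  | zero =>
    rw [PySem.List.pyRange_neg_one_eq_nil (by norm_num)]
    simp [pvGoA, pvEnc]
  | succ n ih =>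
    have hcast : ((n + 1 : Nat) : Int) - 1 = (n : Int) := by push_cast; ring
    rw [hcast, PySem.List.pyRange_neg_one_cons (by omega)]
    have ha := pvEnc_lt A n
    have hb := pvEnc_lt B n
    rw [show (n : Int) - 1 = ((n : Nat) : Int) - 1 from rfl] at *
    have ihn := ih (by omega) (by omega)
    simp only [pvGoA, PySem.List.pyGetD_natCast]
    rcases hAn : A.getD n false <;> rcases hBn : B.getD n false <;>
      simp only [hAn, hBn, pvEnc_succ, if_true, if_false, ne_eq, Bool.false_eq_true,
        not_false_eq_true, Bool.true_eq_false, not_true_eq_false,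
        ihn] <;> split_ifs <;> omega

-- B's foldl builds the two encodings
theorem pvFold_eq (A B : List Bool) (n : Nat) :
    (PySem.List.pyRange 0 (n : Int) 1).foldl
      (fun (s : Int × Int) i =>
        (s.1 + (if PySem.List.pyGetD A i false then 0 else 2 ^ i.toNat),
         s.2 + (if PySem.List.pyGetD B i false then 0 else 2 ^ i.toNat))) (0, 0)
      = ((pvEnc A n : Int), (pvEnc B n : Int)) := by
  induction n with
  | zero => simp [PySem.List.pyRange_one_eq_nil, pvEnc]
  | succ n ih =>
    have hcast : ((n + 1 : Nat) : Int) = (n : Int) + 1 := by push_cast; ring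
    rw [hcast, PySem.List.pyRange_one_succ_right (by omega), List.foldl_append, ih]
    simp only [List.foldl_cons, List.foldl_nil, PySem.List.pyGetD_natCast, Int.toNat_natCast]
    rw [pvEnc_succ, pvEnc_succ]
    push_cast
    rcases hAn : A.getD n false <;> rcases hBn : B.getD n false <;> simp

-- ===== VERDICT (by name: the statement is the Claim_ definition above) =====
theorem compare_states_by_recency_spec : Claim_equal_compare_states_by_recency := by
  intro A B _ hPre
  unfold Spec_compare_states_by_recency compare_states_by_recency compare_states_by_recency_alt
  have hB : A.length ≤ B.length := by
    rcases hPre with h | h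
    · simp [h]
    · exact h
  rw [pvGoA_eq A B A.length le_rfl hB, pvFold_eq A B A.length]
  simp only [gt_iff_lt, Nat.cast_lt]
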